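-- pv_equiv track=rewrite | github.com/machine-teaching-group/tmlr2024_neurtasksyn | src/codetask_scoring/execquality.py | count_codeworld_quality_from_emulator_actions
-- ===== SOURCE A (Python) =====
-- def count_codeworld_quality_from_emulator_actions(actions: list):
--     count_turns, temp2 = 0, 1
--     count_simple, count_long, temp = 0, 0, 1
--     moves, turns, pick_markers, put_markers = 0, 0, 0, 0
--
--     if len(actions) == 0:
--         return moves, turns, count_simple, count_long, pick_markers, put_markers, count_turns
--
--     for act in actions:
--         if act == 'move':
--             moves += 1
--         elif act == 'turnLeft' or act == 'turnRight':
--             turns += 1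
--         elif act == 'pickMarker':
--             pick_markers += 1
--         elif act == 'putMarker':
--             put_markers += 1
--
--     aux_actions = list(filter(lambda x: x not in ['pickMarker', 'putMarker'], actions))
--     for i in range(1, len(aux_actions)):
--         if aux_actions[i] == 'move':
--             if aux_actions[i] == aux_actions[i - 1]:
--                 temp += 1
--             else:
--                 if temp >= 3:
--                     count_simple += 1
--                     if temp >= 5:
--                         count_long += 1
--
--                 temp = 1
--
--         elif aux_actions[i] == 'turnLeft' or aux_actions[i] == 'turnRight':
--             if aux_actions[i] == aux_actions[i - 1]:
--                 temp2 += 1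
--             else:
--                 if temp2 >= 3:
--                     count_turns += 1
--
--                 temp2 = 1
--
--     if temp2 >= 3:
--         count_turns += 1
--
--     if temp >= 3:
--         count_simple += 1
--         if temp >= 5:
--             count_long += 1
--
--     return moves, turns, count_simple, count_long, pick_markers, put_markers, count_turns
-- ===== SOURCE B (Python) =====
-- def _window_starts(aux, token_ok, k):
--     """Count indices i where a length-k window of equal tokens starts a maximal run:
--     aux[i..i+k-1] all equal aux[i], token_ok(aux[i]), and (i == 0 or aux[i-1] != aux[i])."""
--     count = 0
--     prev = None
--     for i, a in enumerate(aux):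
--         if token_ok(a) and prev != a and aux[i + 1:i + k] == [a] * (k - 1):
--             count += 1
--         prev = a
--     return count
--
--
-- def count_codeworld_quality_from_emulator_actions(actions: list):
--     if len(actions) == 0:
--         return 0, 0, 0, 0, 0, 0, 0
--
--     moves = actions.count('move')
--     turns = actions.count('turnLeft') + actions.count('turnRight')
--     pick_markers = actions.count('pickMarker')
--     put_markers = actions.count('putMarker')
--
--     aux = [a for a in actions if a not in ('pickMarker', 'putMarker')]
--     count_simple = _window_starts(aux, lambda a: a == 'move', 3)
--     count_long = _window_starts(aux, lambda a: a == 'move', 5)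
--     count_turns = _window_starts(aux, lambda a: a in ('turnLeft', 'turnRight'), 3)
--
--     return moves, turns, count_simple, count_long, pick_markers, put_markers, count_turns
-- ===== Notes on version B (the rewrite author's own statement) =====
-- stated objective: alternative
-- what changed: Replaces A's two interleaved stateful run-length counters with lazy finalization (and a trailing double-finalize) by three stateless stencil passes that count run-start windows: an index i counts iff aux[i..i+k-1] are all equal (k=3 or 5), the token is admissible, and the previous element differs; tallies come from four list.count passes instead of one branching loop.
import Mathlib
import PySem

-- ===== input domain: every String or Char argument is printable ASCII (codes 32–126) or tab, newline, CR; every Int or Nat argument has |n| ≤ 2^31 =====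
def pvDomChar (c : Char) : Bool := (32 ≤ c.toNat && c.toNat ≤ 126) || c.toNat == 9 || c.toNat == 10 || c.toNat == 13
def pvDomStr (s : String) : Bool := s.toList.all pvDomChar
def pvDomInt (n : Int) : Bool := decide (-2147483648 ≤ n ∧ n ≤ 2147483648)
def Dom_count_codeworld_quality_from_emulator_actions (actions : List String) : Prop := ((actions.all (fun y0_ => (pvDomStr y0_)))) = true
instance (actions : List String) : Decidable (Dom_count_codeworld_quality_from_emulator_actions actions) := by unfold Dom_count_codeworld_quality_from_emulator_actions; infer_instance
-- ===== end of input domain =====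

-- B replaces A's two interleaved stateful run counters (with trailing double-finalize)
-- by three stateless stencil passes counting run-start windows of length 3/5; objective: simpler.

-- ===== PORT A =====
-- trailing finalization after A's index loop (the two ifs after the loop)
def pvAFinal (tm tt cs cl ct : Int) : Int × Int × Int :=
  let ct := if tt ≥ 3 then ct + 1 else ct
  if tm ≥ 3 then (cs + 1, if tm ≥ 5 then cl + 1 else cl, ct) else (cs, cl, ct)

-- A's 'for i in range(1, len(aux))' loop over (aux[i-1], aux[i]) pairs, same state
def pvALoop : String → List String → Int → Int → Int → Int → Int → Int × Int × Int
  | _, [], tm, tt, cs, cl, ct => pvAFinal tm tt cs cl ct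
  | prev, x :: xs, tm, tt, cs, cl, ct =>
    if x == "move" then
      (if x == prev then pvALoop x xs (tm + 1) tt cs cl ct
       else if tm ≥ 3 then pvALoop x xs 1 tt (cs + 1) (if tm ≥ 5 then cl + 1 else cl) ct
       else pvALoop x xs 1 tt cs cl ct)
    else if x == "turnLeft" || x == "turnRight" then
      (if x == prev then pvALoop x xs tm (tt + 1) cs cl ct
       else if tt ≥ 3 then pvALoop x xs tm 1 cs cl (ct + 1)
       else pvALoop x xs tm 1 cs cl ct)
    else pvALoop x xs tm tt cs cl ct

def count_codeworld_quality_from_emulator_actions (actions : List String) : Int × Int × Int × Int × Int × Int × Int :=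
  if actions.length == 0 then (0, 0, 0, 0, 0, 0, 0)
  else
    let t := actions.foldl (fun (s : Int × Int × Int × Int) act =>
      if act == "move" then (s.1 + 1, s.2.1, s.2.2.1, s.2.2.2)
      else if act == "turnLeft" || act == "turnRight" then (s.1, s.2.1 + 1, s.2.2.1, s.2.2.2)
      else if act == "pickMarker" then (s.1, s.2.1, s.2.2.1 + 1, s.2.2.2)
      else if act == "putMarker" then (s.1, s.2.1, s.2.2.1, s.2.2.2 + 1)
      else s) (0, 0, 0, 0)
    let aux := actions.filter (fun x => !(x == "pickMarker" || x == "putMarker"))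
    let r := match aux with
      | [] => pvAFinal 1 1 0 0 0
      | p :: rest => pvALoop p rest 1 1 0 0 0
    (t.1, t.2.1, r.1, r.2.1, t.2.2.1, t.2.2.2, r.2.2)

-- ===== PORT B =====
-- B's _window_starts: walk aux remembering prev; at each element x with suffix xs,
-- the Python slice aux[i+1:i+k] == [a]*(k-1) is xs.take (k-1) == List.replicate (k-1) x
-- (a short slice compares unequal to the replicate, exactly as in Python)
def pvWindowStarts (tokOk : String → Bool) (k : Nat) : Option String → List String → Int
  | _, [] => 0
  | p, x :: xs =>
    (if tokOk x && p != some x && (xs.take (k - 1) == List.replicate (k - 1) x) then 1 else 0)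
      + pvWindowStarts tokOk k (some x) xs

def count_codeworld_quality_from_emulator_actions_alt (actions : List String) : Int × Int × Int × Int × Int × Int × Int :=
  if actions.length == 0 then (0, 0, 0, 0, 0, 0, 0)
  else
    let moves : Int := PySem.List.count actions "move"
    let turns : Int := PySem.List.count actions "turnLeft" + PySem.List.count actions "turnRight"
    let pick_markers : Int := PySem.List.count actions "pickMarker"
    let put_markers : Int := PySem.List.count actions "putMarker"
    let aux := actions.filter (fun a => !(a == "pickMarker" || a == "putMarker"))
    let count_simple := pvWindowStarts (fun a => a == "move") 3 none aux
    let count_long := pvWindowStarts (fun a => a == "move") 5 none aux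
    let count_turns := pvWindowStarts (fun a => a == "turnLeft" || a == "turnRight") 3 none aux
    (moves, turns, count_simple, count_long, pick_markers, put_markers, count_turns)

-- ===== PRECONDITION & SPEC =====
def Spec_count_codeworld_quality_from_emulator_actions (actions : List String) (out : Int × Int × Int × Int × Int × Int × Int) : Prop := out = count_codeworld_quality_from_emulator_actions_alt actions
instance (actions : List String) (out : Int × Int × Int × Int × Int × Int × Int) : Decidable (Spec_count_codeworld_quality_from_emulator_actions actions out) := by unfold Spec_count_codeworld_quality_from_emulator_actions; infer_instance

-- ===== CLAIM (what is proved, stated in full; the proofs are below) =====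
def Claim_equal_count_codeworld_quality_from_emulator_actions : Prop := ∀ (actions : List String), Dom_count_codeworld_quality_from_emulator_actions actions → Spec_count_codeworld_quality_from_emulator_actions actions (count_codeworld_quality_from_emulator_actions actions)

-- ===== LEMMAS AND PROOFS =====

-- componentwise addition on count triples
def pvAdd (a b : Int × Int × Int) : Int × Int × Int := (a.1 + b.1, a.2.1 + b.2.1, a.2.2 + b.2.2)

def pvFinM (tm : Int) : Int × Int × Int :=
  (if tm ≥ 3 then 1 else 0, if tm ≥ 3 then (if tm ≥ 5 then 1 else 0) else 0, 0)

def pvFinT (tt : Int) : Int × Int × Int := (0, 0, if tt ≥ 3 then 1 else 0)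

def pvContrib (run : String × Int) : Int × Int × Int :=
  if run.1 == "move" then pvFinM run.2
  else if run.1 == "turnLeft" || run.1 == "turnRight" then pvFinT run.2
  else (0, 0, 0)

def pvSumC : List (String × Int) → Int × Int × Int
  | [] => (0, 0, 0)
  | r :: rs => pvAdd (pvContrib r) (pvSumC rs)

-- maximal runs of equal adjacent tokens, as (token, length) — the run structure both
-- programs' effects are measured against
def pvRuns : String → Int → List String → List (String × Int)
  | cur, len, [] => [(cur, len)]
  | cur, len, x :: xs => if x == cur then pvRuns cur (len + 1) xs else (cur, len) :: pvRuns x 1 xs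

def pvGroupby (xs : List String) : List (String × Int) :=
  match xs with
  | [] => []
  | x :: rest => pvRuns x 1 rest

-- one component of pvSumC: number of runs with an admissible token and length ≥ k
def pvS (cond : String → Bool) (k : Nat) : List (String × Int) → Int
  | [] => 0
  | r :: rs => (if cond r.1 && decide ((k : Int) ≤ r.2) then 1 else 0) + pvS cond k rs

-- length of the leading run of token t
def pvLead (t : String) : List String → Int
  | [] => 0
  | x :: xs => if x == t then 1 + pvLead t xs else 0

theorem pvRuns_cons_self (cur : String) (l : Int) (xs : List String) :
    pvRuns cur l (cur :: xs) = pvRuns cur (l + 1) xs := by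
  simp [pvRuns]

theorem pvRuns_cons_ne (cur x : String) (l : Int) (xs : List String) (h : x ≠ cur) :
    pvRuns cur l (x :: xs) = (cur, l) :: pvRuns x 1 xs := by
  simp [pvRuns, beq_eq_false_iff_ne.mpr h]

-- run totals do not depend on the recorded length of a run of an inert token
theorem pvSumC_runs_other (xs : List String) (cur : String) (l l' : Int)
    (h1 : cur ≠ "move") (h2 : cur ≠ "turnLeft") (h3 : cur ≠ "turnRight") :
    pvSumC (pvRuns cur l xs) = pvSumC (pvRuns cur l' xs) := by
  induction xs generalizing l l' with
  | nil =>
    simp [pvRuns, pvSumC, pvContrib, beq_eq_false_iff_ne.mpr h1,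
      beq_eq_false_iff_ne.mpr h2, beq_eq_false_iff_ne.mpr h3]
  | cons x xs ih =>
    by_cases hx : x = cur
    · subst hx; rw [pvRuns_cons_self, pvRuns_cons_self]; exact ih _ _
    · rw [pvRuns_cons_ne _ _ _ _ hx, pvRuns_cons_ne _ _ _ _ hx]
      simp only [pvSumC]
      congr 1
      simp [pvContrib, beq_eq_false_iff_ne.mpr h1, beq_eq_false_iff_ne.mpr h2,
        beq_eq_false_iff_ne.mpr h3]

-- the heart of the A side: A's interleaved lazily-finalized counters compute exactly the
-- per-run totals over the run structure
set_option maxHeartbeats 2000000 in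
theorem pvALoop_eq (xs : List String) (prev : String) (tm tt cs cl ct : Int) :
    pvALoop prev xs tm tt cs cl ct =
      pvAdd (cs, cl, ct)
        (if prev = "move" then pvAdd (pvFinT tt) (pvSumC (pvRuns prev tm xs))
         else if prev = "turnLeft" ∨ prev = "turnRight" then pvAdd (pvFinM tm) (pvSumC (pvRuns prev tt xs))
         else pvAdd (pvFinM tm) (pvAdd (pvFinT tt) (pvSumC (pvRuns prev 1 xs)))) := by
  induction xs generalizing prev tm tt cs cl ct with
  | nil =>
    have hL : pvALoop prev [] tm tt cs cl ct = pvAFinal tm tt cs cl ct := by simp [pvALoop]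
    rw [hL]
    by_cases hm : prev = "move"
    · subst hm
      simp only [if_pos rfl, pvRuns, pvSumC, pvContrib, BEq.rfl, if_true, pvAFinal,
        pvAdd, pvFinM, pvFinT, Prod.ext_iff]
      split_ifs <;> simp <;> omega
    · by_cases htn : prev = "turnLeft" ∨ prev = "turnRight"
      · rw [if_neg hm, if_pos htn]
        have hc : pvContrib (prev, tt) = pvFinT tt := by
          rcases htn with h | h <;> subst h <;> simp [pvContrib]
        simp only [pvRuns, pvSumC, hc, pvAFinal, pvAdd, pvFinM, pvFinT, Prod.ext_iff]
        split_ifs <;> simp <;> omega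
      · push_neg at htn
        rw [if_neg hm, if_neg (not_or.mpr htn)]
        have hc : pvContrib (prev, 1) = (0, 0, 0) := by
          simp [pvContrib, beq_eq_false_iff_ne.mpr hm, beq_eq_false_iff_ne.mpr htn.1,
            beq_eq_false_iff_ne.mpr htn.2]
        simp only [pvRuns, pvSumC, hc, pvAFinal, pvAdd, pvFinM, pvFinT, Prod.ext_iff]
        split_ifs <;> simp <;> omega
  | cons x xs ih =>
    rcases eq_or_ne x "move" with hx1 | hx1
    · subst hx1
      rcases eq_or_ne prev "move" with hp1 | hp1
      · subst hp1; simp only [pvALoop, ih]; simp [pvRuns, pvSumC, pvContrib, pvAFinal, pvAdd, pvFinM, pvFinT, Prod.ext_iff, apply_ite Prod.fst, apply_ite Prod.snd]; first | done | (split_ifs <;> omega) | omega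
      · rcases eq_or_ne prev "turnLeft" with hp2 | hp2
        · subst hp2; simp only [pvALoop, ih]; simp [pvRuns, pvSumC, pvContrib, pvAFinal, pvAdd, pvFinM, pvFinT, Prod.ext_iff, apply_ite Prod.fst, apply_ite Prod.snd]; first | done | (split_ifs <;> omega) | omega
        · rcases eq_or_ne prev "turnRight" with hp3 | hp3
          · subst hp3; simp only [pvALoop, ih]; simp [pvRuns, pvSumC, pvContrib, pvAFinal, pvAdd, pvFinM, pvFinT, Prod.ext_iff, apply_ite Prod.fst, apply_ite Prod.snd]; first | done | (split_ifs <;> omega) | omega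
          · simp only [pvALoop, ih]; simp [pvRuns, pvSumC, pvContrib, pvAFinal, pvAdd, pvFinM, pvFinT, Prod.ext_iff, apply_ite Prod.fst, apply_ite Prod.snd, hp1, hp2, hp3, Ne.symm hp1, Ne.symm hp2, Ne.symm hp3]; first | done | (split_ifs <;> omega) | omega
    · rcases eq_or_ne x "turnLeft" with hx2 | hx2
      · subst hx2
        rcases eq_or_ne prev "move" with hp1 | hp1
        · subst hp1; simp only [pvALoop, ih]; simp [pvRuns, pvSumC, pvContrib, pvAFinal, pvAdd, pvFinM, pvFinT, Prod.ext_iff, apply_ite Prod.fst, apply_ite Prod.snd]; first | done | (split_ifs <;> omega) | omega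
        · rcases eq_or_ne prev "turnLeft" with hp2 | hp2
          · subst hp2; simp only [pvALoop, ih]; simp [pvRuns, pvSumC, pvContrib, pvAFinal, pvAdd, pvFinM, pvFinT, Prod.ext_iff, apply_ite Prod.fst, apply_ite Prod.snd]; first | done | (split_ifs <;> omega) | omega
          · rcases eq_or_ne prev "turnRight" with hp3 | hp3
            · subst hp3; simp only [pvALoop, ih]; simp [pvRuns, pvSumC, pvContrib, pvAFinal, pvAdd, pvFinM, pvFinT, Prod.ext_iff, apply_ite Prod.fst, apply_ite Prod.snd]; first | done | (split_ifs <;> omega) | omega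
            · simp only [pvALoop, ih]; simp [pvRuns, pvSumC, pvContrib, pvAFinal, pvAdd, pvFinM, pvFinT, Prod.ext_iff, apply_ite Prod.fst, apply_ite Prod.snd, hp1, hp2, hp3, Ne.symm hp1, Ne.symm hp2, Ne.symm hp3]; first | done | (split_ifs <;> omega) | omega
      · rcases eq_or_ne x "turnRight" with hx3 | hx3
        · subst hx3
          rcases eq_or_ne prev "move" with hp1 | hp1
          · subst hp1; simp only [pvALoop, ih]; simp [pvRuns, pvSumC, pvContrib, pvAFinal, pvAdd, pvFinM, pvFinT, Prod.ext_iff, apply_ite Prod.fst, apply_ite Prod.snd]; first | done | (split_ifs <;> omega) | omega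
          · rcases eq_or_ne prev "turnLeft" with hp2 | hp2
            · subst hp2; simp only [pvALoop, ih]; simp [pvRuns, pvSumC, pvContrib, pvAFinal, pvAdd, pvFinM, pvFinT, Prod.ext_iff, apply_ite Prod.fst, apply_ite Prod.snd]; first | done | (split_ifs <;> omega) | omega
            · rcases eq_or_ne prev "turnRight" with hp3 | hp3
              · subst hp3; simp only [pvALoop, ih]; simp [pvRuns, pvSumC, pvContrib, pvAFinal, pvAdd, pvFinM, pvFinT, Prod.ext_iff, apply_ite Prod.fst, apply_ite Prod.snd]; first | done | (split_ifs <;> omega) | omega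
              · simp only [pvALoop, ih]; simp [pvRuns, pvSumC, pvContrib, pvAFinal, pvAdd, pvFinM, pvFinT, Prod.ext_iff, apply_ite Prod.fst, apply_ite Prod.snd, hp1, hp2, hp3, Ne.symm hp1, Ne.symm hp2, Ne.symm hp3]; first | done | (split_ifs <;> omega) | omega
        · -- x is an inert token
          have h12 : pvSumC (pvRuns x (1 + 1) xs) = pvSumC (pvRuns x 1 xs) :=
            pvSumC_runs_other xs x (1 + 1) 1 hx1 hx2 hx3
          have h12' : pvSumC (pvRuns x 2 xs) = pvSumC (pvRuns x 1 xs) :=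
            pvSumC_runs_other xs x 2 1 hx1 hx2 hx3
          rcases eq_or_ne x prev with hpe | hpe
          · subst hpe; simp only [pvALoop, ih]; simp [pvRuns, pvSumC, pvContrib, pvAFinal, pvAdd, pvFinM, pvFinT, Prod.ext_iff, apply_ite Prod.fst, apply_ite Prod.snd, hx1, hx2, hx3, h12, h12']; first | done | (split_ifs <;> omega) | omega
          · rcases eq_or_ne prev "move" with hp1 | hp1
            · subst hp1; simp only [pvALoop, ih]; simp [pvRuns, pvSumC, pvContrib, pvAFinal, pvAdd, pvFinM, pvFinT, Prod.ext_iff, apply_ite Prod.fst, apply_ite Prod.snd, hx1, hx2, hx3, hpe, Ne.symm hpe]; first | done | (split_ifs <;> omega) | omega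
            · rcases eq_or_ne prev "turnLeft" with hp2 | hp2
              · subst hp2; simp only [pvALoop, ih]; simp [pvRuns, pvSumC, pvContrib, pvAFinal, pvAdd, pvFinM, pvFinT, Prod.ext_iff, apply_ite Prod.fst, apply_ite Prod.snd, hx1, hx2, hx3, hpe, Ne.symm hpe]; first | done | (split_ifs <;> omega) | omega
              · rcases eq_or_ne prev "turnRight" with hp3 | hp3
                · subst hp3; simp only [pvALoop, ih]; simp [pvRuns, pvSumC, pvContrib, pvAFinal, pvAdd, pvFinM, pvFinT, Prod.ext_iff, apply_ite Prod.fst, apply_ite Prod.snd, hx1, hx2, hx3, hpe, Ne.symm hpe]; first | done | (split_ifs <;> omega) | omega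
                · simp only [pvALoop, ih]; simp [pvRuns, pvSumC, pvContrib, pvAFinal, pvAdd, pvFinM, pvFinT, Prod.ext_iff, apply_ite Prod.fst, apply_ite Prod.snd, hx1, hx2, hx3, hpe, Ne.symm hpe, hp1, hp2, hp3, Ne.symm hp1, Ne.symm hp2, Ne.symm hp3]; first | done | (split_ifs <;> omega) | omega

-- A's tally loop equals the four action counts
set_option maxHeartbeats 1000000 in
theorem pvTally_eq (xs : List String) (m tu pk pu : Int) :
    xs.foldl (fun (s : Int × Int × Int × Int) act =>
      if act == "move" then (s.1 + 1, s.2.1, s.2.2.1, s.2.2.2)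
      else if act == "turnLeft" || act == "turnRight" then (s.1, s.2.1 + 1, s.2.2.1, s.2.2.2)
      else if act == "pickMarker" then (s.1, s.2.1, s.2.2.1 + 1, s.2.2.2)
      else if act == "putMarker" then (s.1, s.2.1, s.2.2.1, s.2.2.2 + 1)
      else s) (m, tu, pk, pu) =
    (m + PySem.List.count xs "move",
     tu + PySem.List.count xs "turnLeft" + PySem.List.count xs "turnRight",
     pk + PySem.List.count xs "pickMarker",
     pu + PySem.List.count xs "putMarker") := by
  induction xs generalizing m tu pk pu with
  | nil => simp [PySem.List.count]
  | cons x xs ih =>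
    rw [List.foldl_cons]
    have hv : ∀ v : String, (x :: xs).count v = xs.count v + (if x = v then 1 else 0) := by
      intro v; simp [List.count_cons]
    by_cases h1 : x = "move"
    · subst h1
      rw [if_pos (by decide), ih]
      simp only [PySem.List.count_eq, hv, Prod.ext_iff]
      refine ⟨?_, ?_, ?_, ?_⟩ <;> simp <;> omega
    · by_cases h2 : x = "turnLeft"
      · subst h2
        rw [if_neg (by decide), if_pos (by decide), ih]
        simp only [PySem.List.count_eq, hv, Prod.ext_iff]
        refine ⟨?_, ?_, ?_, ?_⟩ <;> simp <;> omega
      · by_cases h3 : x = "turnRight"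
        · subst h3
          rw [if_neg (by decide), if_pos (by decide), ih]
          simp only [PySem.List.count_eq, hv, Prod.ext_iff]
          refine ⟨?_, ?_, ?_, ?_⟩ <;> simp <;> omega
        · by_cases h4 : x = "pickMarker"
          · subst h4
            rw [if_neg (by decide), if_neg (by decide), if_pos (by decide), ih]
            simp only [PySem.List.count_eq, hv, Prod.ext_iff]
            refine ⟨?_, ?_, ?_, ?_⟩ <;> simp <;> omega
          · by_cases h5 : x = "putMarker"
            · subst h5
              rw [if_neg (by decide), if_neg (by decide), if_neg (by decide),
                if_pos (by decide), ih]
              simp only [PySem.List.count_eq, hv, Prod.ext_iff]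
              refine ⟨?_, ?_, ?_, ?_⟩ <;> simp <;> omega
            · rw [if_neg (by simp [h1]), if_neg (by simp [h2, h3]),
                if_neg (by simp [h4]), if_neg (by simp [h5]), ih]
              simp only [PySem.List.count_eq, hv, Prod.ext_iff]
              refine ⟨?_, ?_, ?_, ?_⟩ <;> simp [h1, h2, h3, h4, h5] <;> omega

-- ===== B side: windows ↔ runs =====

theorem pvLead_nonneg (t : String) (xs : List String) : 0 ≤ pvLead t xs := by
  induction xs with
  | nil => simp [pvLead]
  | cons x xs ih => simp only [pvLead]; split_ifs <;> omega

-- the k-window test at a run start is exactly 'leading run of the tail has length ≥ k-1'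
theorem pvTake_replicate_iff (m : Nat) (x : String) (xs : List String) :
    xs.take m = List.replicate m x ↔ (m : Int) ≤ pvLead x xs := by
  induction xs generalizing m with
  | nil =>
    cases m with
    | zero => simp [pvLead]
    | succ m => simp [pvLead, List.replicate]
  | cons y ys ih =>
    cases m with
    | zero => simp [pvLead]; split_ifs <;> [skip; skip] <;> have := pvLead_nonneg x ys <;> omega
    | succ m =>
      simp only [List.take_succ_cons, List.replicate_succ, List.cons.injEq, pvLead]
      by_cases hy : y = x
      · subst hy
        rw [if_pos (by simp)]
        constructor
        · rintro ⟨-, h⟩; have := (ih m).mp h; push_cast; omega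
        · intro h
          refine ⟨rfl, (ih m).mpr ?_⟩; push_cast at h; omega
      · rw [if_neg (by simpa using hy)]
        constructor
        · rintro ⟨h, -⟩; exact absurd h hy
        · intro h; omega

theorem pvS_runs (cond : String → Bool) (k : Nat) (hk : 1 ≤ k) (xs : List String)
    (cur : String) (l : Int) :
    pvS cond k (pvRuns cur l xs)
      = (if cond cur && decide ((k : Int) ≤ l + pvLead cur xs) then 1 else 0)
        + pvWindowStarts cond k (some cur) xs := by
  induction xs generalizing cur l with
  | nil => simp [pvRuns, pvS, pvWindowStarts, pvLead]
  | cons x xs ih =>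
    by_cases hx : x = cur
    · subst hx
      rw [pvRuns_cons_self, ih]
      have hlead : pvLead x (x :: xs) = 1 + pvLead x xs := by simp [pvLead]
      rw [hlead]
      have : pvWindowStarts cond k (some x) (x :: xs)
          = pvWindowStarts cond k (some x) xs := by
        simp [pvWindowStarts]
      rw [this]
      have harith : l + 1 + pvLead x xs = l + (1 + pvLead x xs) := by ring
      rw [harith]
    · rw [pvRuns_cons_ne _ _ _ _ hx]
      have hlead : pvLead cur (x :: xs) = 0 := by simp [pvLead, beq_eq_false_iff_ne.mpr hx]
      simp only [pvS, ih, hlead, add_zero]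
      have hwin : pvWindowStarts cond k (some cur) (x :: xs)
          = (if cond x && decide ((k : Int) ≤ 1 + pvLead x xs) then 1 else 0)
            + pvWindowStarts cond k (some x) xs := by
        simp only [pvWindowStarts]
        congr 1
        have hne : (some cur != some x) = true := by
          simp [bne, beq_eq_false_iff_ne.mpr (Ne.symm hx)]
        rw [hne]
        by_cases hc : cond x
        · simp only [hc, Bool.true_and]
          have := pvTake_replicate_iff (k - 1) x xs
          by_cases ht : xs.take (k - 1) = List.replicate (k - 1) x
          · rw [if_pos (by simpa using ht), if_pos]
            have h2 := this.mp ht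
            simp only [decide_eq_true_eq]
            omega
          · rw [if_neg (by simpa using ht), if_neg]
            simp only [decide_eq_true_eq]
            intro hcon
            exact ht (this.mpr (by omega))
        · simp [hc]
      rw [hwin]

-- the window count over the whole list equals the per-run totals over all runs
theorem pvWindowStarts_eq_pvS (cond : String → Bool) (k : Nat) (hk : 1 ≤ k)
    (aux : List String) :
    pvWindowStarts cond k none aux = pvS cond k (pvGroupby aux) := by
  cases aux with
  | nil => simp [pvWindowStarts, pvGroupby, pvS]
  | cons x xs =>
    rw [pvGroupby, pvS_runs cond k hk]
    simp only [pvWindowStarts]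
    congr 1
    have hne : ((none : Option String) != some x) = true := by simp [bne]
    rw [hne, Bool.and_true]
    by_cases hc : cond x
    · simp only [hc, Bool.true_and]
      have := pvTake_replicate_iff (k - 1) x xs
      by_cases ht : xs.take (k - 1) = List.replicate (k - 1) x
      · rw [if_pos (by simpa using ht), if_pos]
        have h2 := this.mp ht
        simp only [decide_eq_true_eq]
        omega
      · rw [if_neg (by simpa using ht), if_neg]
        simp only [decide_eq_true_eq]
        intro hcon
        exact ht (this.mpr (by omega))
    · simp [hc]

-- the run-total triple splits into the three pvS components B computes
theorem pvSumC_eq_components (rs : List (String × Int)) :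
    pvSumC rs = (pvS (fun a => a == "move") 3 rs,
                 pvS (fun a => a == "move") 5 rs,
                 pvS (fun a => a == "turnLeft" || a == "turnRight") 3 rs) := by
  induction rs with
  | nil => simp [pvSumC, pvS]
  | cons r rs ih =>
    obtain ⟨t, l⟩ := r
    by_cases h1 : t = "move"
    · subst h1
      refine Prod.ext ?_ (Prod.ext ?_ ?_) <;>
        simp [pvSumC, pvAdd, ih, pvS, pvContrib, pvFinM, pvFinT] <;>
        first | rfl | (split_ifs <;> omega) | omega
    · by_cases h2 : t = "turnLeft" ∨ t = "turnRight"
      · rcases h2 with h2 | h2 <;> subst h2 <;>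
          refine Prod.ext ?_ (Prod.ext ?_ ?_) <;>
          simp [pvSumC, pvAdd, ih, pvS, pvContrib, pvFinM, pvFinT] <;>
          first | rfl | (split_ifs <;> omega) | omega
      · push_neg at h2
        refine Prod.ext ?_ (Prod.ext ?_ ?_) <;>
          simp [pvSumC, pvAdd, ih, pvS, pvContrib, pvFinM, pvFinT,
            beq_eq_false_iff_ne.mpr h1, beq_eq_false_iff_ne.mpr h2.1,
            beq_eq_false_iff_ne.mpr h2.2] <;>
          first | rfl | (split_ifs <;> omega) | omega

-- ===== VERDICT (by name: the statement is the Claim_ definition above) =====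
set_option maxHeartbeats 1000000 in
theorem count_codeworld_quality_from_emulator_actions_spec : Claim_equal_count_codeworld_quality_from_emulator_actions := by
  intro actions _
  unfold Spec_count_codeworld_quality_from_emulator_actions
  have hmatch : ∀ aux : List String, (match aux with
      | [] => pvAFinal 1 1 0 0 0
      | p :: rest => pvALoop p rest 1 1 0 0 0) = pvSumC (pvGroupby aux) := by
    intro aux
    cases aux with
    | nil => simp [pvAFinal, pvGroupby, pvSumC]
    | cons p rest =>
      show pvALoop p rest 1 1 0 0 0 = pvSumC (pvGroupby (p :: rest))
      rw [pvALoop_eq]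
      simp only [pvGroupby]
      by_cases hm : p = "move"
      · subst hm
        rw [if_pos rfl]
        simp [pvAdd, pvFinT, Prod.ext_iff]
      · by_cases ht : p = "turnLeft" ∨ p = "turnRight"
        · rw [if_neg hm, if_pos ht]
          simp [pvAdd, pvFinM, Prod.ext_iff]
        · push_neg at ht
          rw [if_neg hm, if_neg (not_or.mpr ht)]
          simp [pvAdd, pvFinM, pvFinT, Prod.ext_iff]
  cases actions with
  | nil => rfl
  | cons a as =>
    simp only [count_codeworld_quality_from_emulator_actions,
      count_codeworld_quality_from_emulator_actions_alt, List.length_cons, hmatch]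
    rw [if_neg (by simp), if_neg (by simp)]
    rw [pvTally_eq]
    rw [pvWindowStarts_eq_pvS _ 3 (by norm_num), pvWindowStarts_eq_pvS _ 5 (by norm_num),
      pvWindowStarts_eq_pvS _ 3 (by norm_num), pvSumC_eq_components]
    simp [Prod.ext_iff]
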